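-- pv_equiv track=rewrite | github.com/pypi-data/pypi-mirror-372 | packages/resinkit-api-python/resinkit_api_python-0.1.4-py3-none-any.whl/resinkit_api/services/agent/kafka_crawl/service.py | _looks_like_regex_pattern
-- ===== SOURCE A (Python) =====
-- def _looks_like_regex_pattern(topic_name: str) -> bool:
--     """Check if a topic name looks like it might be intended as a regex pattern"""
--     # Common regex patterns that users might accidentally use as topic names
--     regex_indicators = [
--         "*",  # Wildcard
--         ".",  # Any character (especially when combined with *)
--         "?",  # Optional
--         "+",  # One or more
--         "^",  # Start anchor
--         "$",  # End anchor
--         "[",  # Character class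
--         "]",  # Character class end
--         "(",  # Group
--         ")",  # Group end
--         "|",  # Alternation
--         "\\",  # Escape
--     ]
--
--     # Check for standalone common patterns
--     if topic_name in [".*", "*", "?", "+", "^", "$"]:
--         return True
--
--     # Check for regex special characters
--     for indicator in regex_indicators:
--         if indicator in topic_name:
--             return True
--
--     return False
-- ===== SOURCE B (Python) =====
-- _SPECIAL = set("*.?+^$[]()|\\")
--
-- def _looks_like_regex_pattern(topic_name: str) -> bool:
--     """Check if a topic name looks like it might be intended as a regex pattern"""
--     return any(c in _SPECIAL for c in topic_name)
-- ===== Notes on version B (the rewrite author's own statement) =====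
-- stated objective: idiomatic
-- what changed: Dropped the redundant standalone-pattern list (every such pattern contains a special character) and replaced the twelve substring scans with a single pass over the characters testing membership in a set of special characters.
import Mathlib
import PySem

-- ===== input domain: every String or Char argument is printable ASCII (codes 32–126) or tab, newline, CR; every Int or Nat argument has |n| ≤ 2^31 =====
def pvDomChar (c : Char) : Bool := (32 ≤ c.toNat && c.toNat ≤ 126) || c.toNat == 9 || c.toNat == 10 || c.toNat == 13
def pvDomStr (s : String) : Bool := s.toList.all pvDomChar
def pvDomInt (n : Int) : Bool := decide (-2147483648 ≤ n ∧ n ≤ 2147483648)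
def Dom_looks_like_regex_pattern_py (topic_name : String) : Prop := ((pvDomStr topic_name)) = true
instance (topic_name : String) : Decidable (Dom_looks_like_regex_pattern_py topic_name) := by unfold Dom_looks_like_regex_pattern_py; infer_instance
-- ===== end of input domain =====

-- B drops the redundant standalone-pattern list and does one pass over the characters
-- testing membership in a set of the special characters (idiomatic, single scan).

-- ===== PORT A =====
def looks_like_regex_pattern_py (topic_name : String) : Bool :=
  let regex_indicators : List String :=
    ["*", ".", "?", "+", "^", "$", "[", "]", "(", ")", "|", "\\"]
  -- standalone common patterns
  if topic_name ∈ ([".*", "*", "?", "+", "^", "$"] : List String) then true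
  -- loop with early return over the indicators
  else regex_indicators.any (fun ind => PySem.Str.isIn ind topic_name)

-- ===== PORT B =====
-- set("*.?+^$[]()|\\") — a Python set of the 12 distinct special characters
def pvSpecialChars : PySem.Set Char :=
  PySem.Set.ofList ['*', '.', '?', '+', '^', '$', '[', ']', '(', ')', '|', '\\']

def looks_like_regex_pattern_py_alt (topic_name : String) : Bool :=
  topic_name.toList.any (fun c => PySem.Set.contains pvSpecialChars c)

-- ===== PRECONDITION & SPEC =====
def Spec_looks_like_regex_pattern_py (topic_name : String) (out : Bool) : Prop := out = looks_like_regex_pattern_py_alt topic_name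
instance (topic_name : String) (out : Bool) : Decidable (Spec_looks_like_regex_pattern_py topic_name out) := by unfold Spec_looks_like_regex_pattern_py; infer_instance

-- ===== CLAIM (what is proved, stated in full; the proofs are below) =====
def Claim_equal_looks_like_regex_pattern_py : Prop := ∀ (topic_name : String), Dom_looks_like_regex_pattern_py topic_name → Spec_looks_like_regex_pattern_py topic_name (looks_like_regex_pattern_py topic_name)

-- ===== LEMMAS AND PROOFS =====

-- a one-character substring test is a character-membership test
theorem isIn_singleton (c : Char) (l : List Char) :
    PySem.Chars.isIn [c] l = l.contains c := by
  by_cases h : c ∈ l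
  · rw [(PySem.Chars.isIn_iff_infix [c] l).2 ((List.singleton_infix_iff c l).2 h)]
    simpa using h
  · rw [(PySem.Chars.isIn_eq_false_iff [c] l).2 (fun hi => h ((List.singleton_infix_iff c l).1 hi))]
    simpa using h

-- "some x of xs occurs in l" = "some c of l occurs in xs"
theorem any_contains_swap (xs l : List Char) :
    xs.any (fun x => l.contains x) = l.any (fun c => xs.contains c) := by
  rw [Bool.eq_iff_iff]
  simp only [List.any_eq_true, List.contains_iff_mem]
  exact ⟨fun ⟨a, h1, h2⟩ => ⟨a, h2, h1⟩, fun ⟨a, h1, h2⟩ => ⟨a, h2, h1⟩⟩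

-- B on the characters of l, written as "some special char occurs in l"
theorem alt_over_list (l : List Char) :
    l.any (fun c => PySem.Set.contains pvSpecialChars c)
      = (['*', '.', '?', '+', '^', '$', '[', ']', '(', ')', '|', '\\'] : List Char).any
          (fun c => l.contains c) := by
  rw [any_contains_swap]
  have h : pvSpecialChars = (['*', '.', '?', '+', '^', '$', '[', ']', '(', ')', '|', '\\'] : List Char) := by decide
  simp [h]

-- ===== VERDICT (by name: the statement is the Claim_ definition above) =====

theorem looks_like_regex_pattern_py_spec : Claim_equal_looks_like_regex_pattern_py := by
  intro tn _
  unfold Spec_looks_like_regex_pattern_py looks_like_regex_pattern_py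
  simp only []
  split
  · -- standalone branch: each of the six literals contains a special char
    rename_i h
    simp only [List.mem_cons, List.not_mem_nil, or_false] at h
    rcases h with h | h | h | h | h | h <;> subst h <;> decide
  · -- the indicator loop equals B's single pass
    show _ = looks_like_regex_pattern_py_alt tn
    unfold looks_like_regex_pattern_py_alt
    rw [alt_over_list tn.toList]
    simp [PySem.Str.isIn, isIn_singleton]
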